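-- pv_equiv track=rewrite | github.com/CZboop/Challenges-and-Interview-Question-Practice | codewars/python/Simple Fun #253 Cool String.py | cool_string
-- ===== SOURCE A (Python) =====
-- def cool_string(s):
--     if any(i.isnumeric() for i in s) or s.count(" ")>0:
--         return False
--     for c,v in enumerate(s[:-1]):
--         if v.islower() and s[c+1].islower():
--             return False
--         if v.isupper() and s[c+1].isupper():
--             return False
--     return True
-- ===== SOURCE B (Python) =====
-- def cool_string(s):
--     prev = None
--     for c in s:
--         if c.isnumeric() or c == ' ':
--             return False
--         if prev is not None:
--             if (prev.islower() and c.islower()) or (prev.isupper() and c.isupper()):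
--                 return False
--         prev = c
--     return True
-- ===== Notes on version B (the rewrite author's own statement) =====
-- stated objective: simpler
-- what changed: Replaces A's three separate scans (any-digit generator, space count, and an index-based adjacency loop over enumerate(s[:-1]) with s[c+1] lookups) by one indexing-free pass that carries the previous character.
import Mathlib
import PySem

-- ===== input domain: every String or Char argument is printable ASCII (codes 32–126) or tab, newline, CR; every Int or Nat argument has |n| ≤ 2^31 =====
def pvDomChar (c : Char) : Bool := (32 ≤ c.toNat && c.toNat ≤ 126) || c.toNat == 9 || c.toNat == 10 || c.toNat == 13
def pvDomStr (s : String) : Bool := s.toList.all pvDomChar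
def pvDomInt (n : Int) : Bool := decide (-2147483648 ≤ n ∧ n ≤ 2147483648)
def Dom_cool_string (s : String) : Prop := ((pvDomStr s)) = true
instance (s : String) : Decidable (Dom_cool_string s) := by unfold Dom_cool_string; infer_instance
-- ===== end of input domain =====

-- B replaces A's three separate scans (any-digit, space count, indexed adjacency loop) by one
-- indexing-free pass carrying the previous character (objective: simpler).

-- ===== PORT A =====
-- A's adjacency loop: for c, v in enumerate(s[:-1]): checks v and s[c+1]
def coolLoopA (cs : List Char) : List (Int × Char) → Bool
  | [] => true
  | (c, v) :: rest =>
    if PySem.Chars.islower v && PySem.Chars.islower (PySem.List.pyGetD cs (c + 1) ' ') then false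
    else if PySem.Chars.isupper v && PySem.Chars.isupper (PySem.List.pyGetD cs (c + 1) ' ') then false
    else coolLoopA cs rest

-- on the ASCII domain Dom_cool_string, Python's str.isnumeric agrees with isdigit
def cool_string (s : String) : Bool :=
  if s.toList.any (fun i => PySem.Chars.isdigit i) || PySem.Str.count s " " > 0 then false
  else coolLoopA s.toList (PySem.List.enumerate (PySem.List.slice s.toList none (some (-1))) 0)

-- ===== PORT B =====
-- B's single pass: prev : Option Char is the previously seen character
def coolLoopB : Option Char → List Char → Bool
  | _, [] => true
  | prev, c :: rest =>
    if PySem.Chars.isdigit c || c == ' ' then false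
    else
      match prev with
      | some p =>
        if (PySem.Chars.islower p && PySem.Chars.islower c)
            || (PySem.Chars.isupper p && PySem.Chars.isupper c) then false
        else coolLoopB (some c) rest
      | none => coolLoopB (some c) rest

def cool_string_alt (s : String) : Bool := coolLoopB none s.toList

-- ===== PRECONDITION & SPEC =====
def Spec_cool_string (s : String) (out : Bool) : Prop := out = cool_string_alt s
instance (s : String) (out : Bool) : Decidable (Spec_cool_string s out) := by unfold Spec_cool_string; infer_instance

-- ===== CLAIM (what is proved, stated in full; the proofs are below) =====
def Claim_equal_cool_string : Prop := ∀ (s : String), Dom_cool_string s → Spec_cool_string s (cool_string s)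

-- ===== LEMMAS AND PROOFS =====

-- "clean": neither a digit nor a space
def pvClean (c : Char) : Bool := !(PySem.Chars.isdigit c || c == ' ')

def pvSamecase (p c : Char) : Bool :=
  (PySem.Chars.islower p && PySem.Chars.islower c) || (PySem.Chars.isupper p && PySem.Chars.isupper c)

def pvChain : List Char → Bool
  | [] => true
  | [_] => true
  | a :: b :: r => !pvSamecase a b && pvChain (b :: r)

def pvHeadOK : Option Char → List Char → Bool
  | some p, c :: _ => !pvSamecase p c
  | _, _ => true

theorem pvChain_cons (c : Char) (rest : List Char) :
    pvChain (c :: rest) = (pvHeadOK (some c) rest && pvChain rest) := by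
  cases rest <;> simp [pvChain, pvHeadOK]

theorem pvHeadOK_none (cs : List Char) : pvHeadOK none cs = true := by
  cases cs <;> rfl

theorem pvHeadOK_some_cons (p c : Char) (r : List Char) :
    pvHeadOK (some p) (c :: r) = !pvSamecase p c := rfl

theorem coolLoopB_eq (cs : List Char) : ∀ (p? : Option Char),
    coolLoopB p? cs = (cs.all pvClean && pvHeadOK p? cs && pvChain cs) := by
  induction cs with
  | nil => intro p?; cases p? <;> simp [coolLoopB, pvChain, pvHeadOK]
  | cons c rest ih =>
    intro p?
    rw [pvChain_cons]
    cases p? with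
    | none =>
      show (if PySem.Chars.isdigit c || c == ' ' then false else coolLoopB (some c) rest) = _
      rw [pvHeadOK_none]
      by_cases hc : (PySem.Chars.isdigit c || c == ' ') = true
      · simp [hc, pvClean]
      · rw [if_neg hc, ih]
        have hcl : pvClean c = true := by
          simp only [pvClean, Bool.not_eq_true']
          exact Bool.not_eq_true _ ▸ hc
        simp [hcl, Bool.and_left_comm, Bool.and_comm]
    | some p =>
      show (if PySem.Chars.isdigit c || c == ' ' then false
            else if (PySem.Chars.islower p && PySem.Chars.islower c)
                || (PySem.Chars.isupper p && PySem.Chars.isupper c) then false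
            else coolLoopB (some c) rest) = _
      rw [pvHeadOK_some_cons]
      by_cases hc : (PySem.Chars.isdigit c || c == ' ') = true
      · simp [hc, pvClean]
      · rw [if_neg hc]
        have hcl : pvClean c = true := by
          simp only [pvClean, Bool.not_eq_true']
          exact Bool.not_eq_true _ ▸ hc
        by_cases hp : ((PySem.Chars.islower p && PySem.Chars.islower c)
            || (PySem.Chars.isupper p && PySem.Chars.isupper c)) = true
        · simp [hp, pvSamecase]
        · rw [if_neg hp, ih]
          have hps : pvSamecase p c = false := by
            simp only [pvSamecase]
            exact Bool.not_eq_true _ ▸ hp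
          simp [hcl, hps, Bool.and_left_comm, Bool.and_comm]

theorem alt_eq (s : String) :
    cool_string_alt s = (s.toList.all pvClean && pvChain s.toList) := by
  rw [cool_string_alt, coolLoopB_eq]
  rw [pvHeadOK_none]
  simp

-- single-character substring count = list count
theorem count_go_singleton (x : Char) : ∀ (n : Nat) (cs : List Char) (acc : Nat),
    cs.length ≤ n → PySem.Chars.count.go [x] n cs acc = acc + cs.count x := by
  intro n
  induction n with
  | zero =>
    intro cs acc h
    have : cs = [] := List.length_eq_zero_iff.mp (Nat.le_zero.mp h)
    subst this
    simp [PySem.Chars.count.go]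
  | succ n ih =>
    intro cs acc h
    cases cs with
    | nil => simp [PySem.Chars.count.go]
    | cons c t =>
      simp only [PySem.Chars.count.go]
      by_cases hx : c = x
      · subst hx
        rw [if_pos (by simp)]
        simp only [List.length_cons, List.length_nil, List.drop_succ_cons, List.drop_zero]
        rw [ih t (acc + 1) (by simpa using h)]
        simp
        omega
      · rw [if_neg (by simp [List.isPrefixOf_iff_prefix, List.prefix_cons_iff, Ne.symm hx])]
        rw [ih t acc (by simpa using h)]
        simp [hx]

theorem count_singleton (cs : List Char) (x : Char) :
    PySem.Chars.count cs [x] = cs.count x := by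
  rw [PySem.Chars.count]
  simp only [List.isEmpty_iff, reduceCtorEq, if_false]
  simpa using count_go_singleton x cs.length cs 0 le_rfl

-- A's adjacency loop computes the adjacency chain check
theorem coolLoopA_eq (cs : List Char) : ∀ (pre : List Char),
    coolLoopA (pre ++ cs) (PySem.List.enumerate cs.dropLast (pre.length : Int)) = pvChain cs := by
  induction cs with
  | nil => intro pre; simp [coolLoopA, pvChain]
  | cons c1 tl ih =>
    intro pre
    cases tl with
    | nil => simp [coolLoopA, pvChain]
    | cons c2 rest =>
      have hget : PySem.List.pyGetD (pre ++ c1 :: c2 :: rest) ((pre.length : Int) + 1) ' ' = c2 := by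
        have hcast : ((pre.length : Int) + 1) = ((pre.length + 1 : Nat) : Int) := by push_cast; ring
        rw [hcast, PySem.List.pyGetD_natCast]
        rw [List.getD_eq_getElem?_getD, List.getElem?_append_right (by omega)]
        simp
      have hih := ih (pre ++ [c1])
      simp only [List.append_assoc, List.singleton_append, List.length_append,
        List.length_cons, List.length_nil] at hih
      push_cast at hih
      simp only [List.dropLast_cons₂, PySem.List.enumerate_cons, coolLoopA, hget]
      rw [pvChain_cons]
      simp only [pvHeadOK]
      by_cases h1 : (PySem.Chars.islower c1 && PySem.Chars.islower c2) = true
      · simp [h1, pvSamecase]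
      · by_cases h2 : (PySem.Chars.isupper c1 && PySem.Chars.isupper c2) = true
        · simp [h1, h2, pvSamecase]
        · simp only [h1, h2, if_neg, Bool.false_eq_true, not_false_iff]
          rw [hih, pvChain_cons]
          simp [pvSamecase, h1, h2]

theorem a_eq (s : String) :
    cool_string s = (s.toList.all pvClean && pvChain s.toList) := by
  rw [cool_string]
  by_cases h : (s.toList.any (fun i => PySem.Chars.isdigit i) || PySem.Str.count s " " > 0) = true
  · rw [if_pos (by simpa using h)]
    have hmem : ∃ c ∈ s.toList, (PySem.Chars.isdigit c || c == ' ') = true := by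
      rcases Bool.or_eq_true .. ▸ h with hd | hs
      · simp only [List.any_eq_true] at hd
        obtain ⟨c, hc, hdc⟩ := hd
        exact ⟨c, hc, by simp [hdc]⟩
      · have hsp : (' ' : Char) ∈ s.toList := by
          have hc : PySem.Str.count s " " = s.toList.count ' ' := by
            simp only [PySem.Str.count]
            exact count_singleton s.toList ' '
          simp only [hc, decide_eq_true_eq] at hs
          exact List.count_pos_iff.mp (by omega)
        exact ⟨' ', hsp, by simp⟩
    obtain ⟨c, hc, hbad⟩ := hmem
    have hfalse : s.toList.all pvClean = false := by
      simp only [List.all_eq_false]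
      exact ⟨c, hc, by simp [pvClean, hbad]⟩
    simp [hfalse]
  · rw [if_neg (by simpa using h)]
    rw [Bool.not_eq_true, Bool.or_eq_false_iff] at h
    obtain ⟨hd, hs⟩ := h
    have hcnt : PySem.Str.count s " " = s.toList.count ' ' := by
      simp only [PySem.Str.count]
      exact count_singleton s.toList ' '
    have hnospace : (' ' : Char) ∉ s.toList := by
      intro hmem
      rw [decide_eq_false_iff_not, hcnt] at hs
      exact hs (List.count_pos_iff.mpr hmem)
    have hall : s.toList.all pvClean = true := by
      simp only [List.all_eq_true]
      intro c hc
      have hnd : PySem.Chars.isdigit c = false := by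
        simpa using List.any_eq_false.mp hd c hc
      have hns : (c == ' ') = false := by
        simp only [beq_eq_false_iff_ne, ne_eq]
        intro hcs; subst hcs; exact hnospace hc
      simp [pvClean, hnd, hns]
    rw [PySem.List.slice_to_neg_one]
    have hA := coolLoopA_eq s.toList []
    simpa [hall] using hA

-- ===== VERDICT (by name: the statement is the Claim_ definition above) =====
theorem cool_string_spec : Claim_equal_cool_string := by
  intro s _
  unfold Spec_cool_string
  rw [a_eq, alt_eq]
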